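-- pv_equiv track=rewrite | github.com/DNPotapov/Codewars-katas- | Odd-heavy Array (6 kyu).py | is_odd_heavy
-- ===== SOURCE A (Python) =====
-- def is_odd_heavy(arr):
--     odds = [i for i in arr if i%2]
--     even = [i for i in arr if not i%2]
--     if len(odds) == 0:
--         return False
--     if len(even) == 0:
--         return True
--     return min(odds) > max(even)
-- ===== SOURCE B (Python) =====
-- def is_odd_heavy(arr):
--     has_odd = has_even = False
--     min_odd = max_even = 0
--     for i in arr:
--         if i % 2:
--             if not has_odd or i < min_odd:
--                 min_odd = i
--             has_odd = True
--         else: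
--             if not has_even or i > max_even:
--                 max_even = i
--             has_even = True
--     if not has_odd:
--         return False
--     if not has_even:
--         return True
--     return min_odd > max_even
-- ===== Notes on version B (the rewrite author's own statement) =====
-- stated objective: alternative
-- what changed: Replaced the two list comprehensions plus min/max reductions (four passes over arr) with one accumulating loop maintaining scalar state has_odd/min_odd/has_even/max_even.
import Mathlib
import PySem

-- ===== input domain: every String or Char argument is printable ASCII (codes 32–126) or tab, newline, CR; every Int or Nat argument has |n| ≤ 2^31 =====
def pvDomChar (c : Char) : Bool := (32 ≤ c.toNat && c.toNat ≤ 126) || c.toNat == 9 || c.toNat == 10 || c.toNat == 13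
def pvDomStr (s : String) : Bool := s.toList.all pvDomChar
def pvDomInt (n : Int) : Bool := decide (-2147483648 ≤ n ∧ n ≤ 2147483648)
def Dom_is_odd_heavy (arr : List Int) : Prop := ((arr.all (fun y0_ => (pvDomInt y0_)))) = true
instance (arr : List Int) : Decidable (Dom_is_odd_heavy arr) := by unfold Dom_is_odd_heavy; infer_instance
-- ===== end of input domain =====

-- B replaces A's two comprehensions + min/max reductions with a single accumulating pass keeping only scalars (alternative decomposition, same O(n) cost).

-- ===== PORT A =====
def is_odd_heavy (arr : List Int) : Bool :=
  let odds := arr.filter (fun i => decide (PySem.Int.mod i 2 ≠ 0))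
  let even := arr.filter (fun i => !decide (PySem.Int.mod i 2 ≠ 0))
  if odds.length = 0 then false
  else if even.length = 0 then true
  else
    match PySem.List.min? odds (fun x => x), PySem.List.max? even (fun x => x) with
    | some a, some b => decide (a > b)
    | _, _ => false   -- unreachable: both lists are nonempty here

-- ===== PORT B =====
-- loop body of Source B: state (has_odd, min_odd, has_even, max_even)
def ohStep (st : Bool × Int × Bool × Int) (i : Int) : Bool × Int × Bool × Int :=
  match st with
  | (ho, mo, he, me) =>
    if PySem.Int.mod i 2 ≠ 0 then
      (true, if !ho || i < mo then i else mo, he, me)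
    else
      (ho, mo, true, if !he || i > me then i else me)

def is_odd_heavy_alt (arr : List Int) : Bool :=
  match arr.foldl ohStep (false, 0, false, 0) with
  | (ho, mo, he, me) =>
    if !ho then false
    else if !he then true
    else decide (mo > me)

-- ===== PRECONDITION & SPEC =====
def Spec_is_odd_heavy (arr : List Int) (out : Bool) : Prop := out = is_odd_heavy_alt arr
instance (arr : List Int) (out : Bool) : Decidable (Spec_is_odd_heavy arr out) := by unfold Spec_is_odd_heavy; infer_instance

-- ===== CLAIM (what is proved, stated in full; the proofs are below) =====
def Claim_equal_is_odd_heavy : Prop := ∀ (arr : List Int), Dom_is_odd_heavy arr → Spec_is_odd_heavy arr (is_odd_heavy arr)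

-- ===== LEMMAS AND PROOFS =====

-- value of the odd accumulator given initial flag/value and the list of odds seen
def mfold (ho : Bool) (mo : Int) (odds : List Int) : Int :=
  if ho then odds.foldl min mo
  else match odds with
       | [] => mo
       | x :: t => t.foldl min x

def xfold (he : Bool) (me : Int) (even : List Int) : Int :=
  if he then even.foldl max me
  else match even with
       | [] => me
       | x :: t => t.foldl max x

theorem mfold_cons (ho : Bool) (mo i : Int) (l : List Int) :
    mfold ho mo (i :: l) = mfold true (if !ho || i < mo then i else mo) l := by
  have hmin : min mo i = if i < mo then i else mo := by omega
  cases ho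
  · simp only [mfold, Bool.not_false, Bool.true_or, if_true]
    rcases l with _ | ⟨x, t⟩ <;> simp
  · simp [mfold, List.foldl, hmin]

theorem xfold_cons (he : Bool) (me i : Int) (l : List Int) :
    xfold he me (i :: l) = xfold true (if !he || i > me then i else me) l := by
  have hmax : max me i = if me < i then i else me := by omega
  cases he
  · simp only [xfold, Bool.not_false, Bool.true_or, if_true]
    rcases l with _ | ⟨x, t⟩ <;> simp
  · simp [xfold, List.foldl, hmax]

theorem fold_inv (l : List Int) : ∀ (ho : Bool) (mo : Int) (he : Bool) (me : Int),
    l.foldl ohStep (ho, mo, he, me) =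
      (ho || !(l.filter (fun i => decide (PySem.Int.mod i 2 ≠ 0))).isEmpty,
       mfold ho mo (l.filter (fun i => decide (PySem.Int.mod i 2 ≠ 0))),
       he || !(l.filter (fun i => !decide (PySem.Int.mod i 2 ≠ 0))).isEmpty,
       xfold he me (l.filter (fun i => !decide (PySem.Int.mod i 2 ≠ 0)))) := by
  induction l with
  | nil => intro ho mo he me; simp [mfold, xfold]
  | cons i t ih =>
    intro ho mo he me
    by_cases h : PySem.Int.mod i 2 ≠ 0
    · simp only [List.foldl_cons, ohStep, if_pos h, ih]
      rw [List.filter_cons_of_pos (by simpa using h),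
          List.filter_cons_of_neg (by simpa using h)]
      simp [mfold_cons]
    · simp only [List.foldl_cons, ohStep, if_neg h, ih]
      rw [List.filter_cons_of_neg (by simpa using h),
          List.filter_cons_of_pos (by simpa using h)]
      simp [xfold_cons]

-- ===== VERDICT (by name: the statement is the Claim_ definition above) =====
theorem is_odd_heavy_spec : Claim_equal_is_odd_heavy := by
  intro arr _
  unfold Spec_is_odd_heavy is_odd_heavy is_odd_heavy_alt
  rw [fold_inv]
  rcases hodds : arr.filter (fun i => decide (PySem.Int.mod i 2 ≠ 0)) with _ | ⟨a, ta⟩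
  · simp
  · rcases heven : arr.filter (fun i => !decide (PySem.Int.mod i 2 ≠ 0)) with _ | ⟨b, tb⟩
    · simp
    · simp [PySem.List.min?_id_cons, PySem.List.max?_id_cons, mfold, xfold]
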